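-- pv_equiv track=rewrite | github.com/Lnna/ability | cranfield_testdata/upenn_transfer/treebank_parse.py | diff_seg_pattern
-- ===== SOURCE A (Python) =====
-- def diff_seg_pattern(diff_ctb,diff_bos):
--     patterns_words={}
--     patterns_counts={}
--
--     for ctb,bos in zip(diff_ctb,diff_bos):
--
--         pos_c=' + '.join([i[1] for i in ctb])
--         pos_b=' + '.join([i[1] for i in bos])
--         pat='{} = {}'.format(pos_c,pos_b)
--
--         if patterns_words.get(pat,'')=='':
--             patterns_words[pat]=[([i[0] for i in ctb],[i[0] for i in bos])]
--             patterns_counts[pat]=1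
--         else:
--             if ([i[0] for i in ctb],[i[0] for i in bos]) not in patterns_words[pat]:
--                 patterns_words[pat].extend([([i[0] for i in ctb],[i[0] for i in bos])])
--             patterns_counts[pat]=int(patterns_counts[pat])+1
--
--     return patterns_words,patterns_counts
-- ===== SOURCE B (Python) =====
-- def diff_seg_pattern(diff_ctb, diff_bos):
--     # Phase 1: group all word-pairs by their POS pattern, no dedup/counting yet.
--     groups = {}
--     for ctb, bos in zip(diff_ctb, diff_bos):
--         pat = '{} = {}'.format(' + '.join(t for _, t in ctb),
--                                ' + '.join(t for _, t in bos))
--         groups.setdefault(pat, []).append(([w for w, _ in ctb], [w for w, _ in bos]))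
--     # Phase 2: counts are just group sizes.
--     patterns_counts = {pat: len(pairs) for pat, pairs in groups.items()}
--     # Phase 3: order-preserving dedup of each group's pairs.
--     patterns_words = {}
--     for pat, pairs in groups.items():
--         uniq = []
--         for p in pairs:
--             if p not in uniq:
--                 uniq.append(p)
--         patterns_words[pat] = uniq
--     return patterns_words, patterns_counts
-- ===== Notes on version B (the rewrite author's own statement) =====
-- stated objective: alternative
-- what changed: A builds both dicts in one interleaved pass (dedup membership test and count increment per item); B first groups all word-pairs by pattern into one dict, then derives counts as group sizes and derives the words dict by an order-preserving dedup of each group.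
import Mathlib
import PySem

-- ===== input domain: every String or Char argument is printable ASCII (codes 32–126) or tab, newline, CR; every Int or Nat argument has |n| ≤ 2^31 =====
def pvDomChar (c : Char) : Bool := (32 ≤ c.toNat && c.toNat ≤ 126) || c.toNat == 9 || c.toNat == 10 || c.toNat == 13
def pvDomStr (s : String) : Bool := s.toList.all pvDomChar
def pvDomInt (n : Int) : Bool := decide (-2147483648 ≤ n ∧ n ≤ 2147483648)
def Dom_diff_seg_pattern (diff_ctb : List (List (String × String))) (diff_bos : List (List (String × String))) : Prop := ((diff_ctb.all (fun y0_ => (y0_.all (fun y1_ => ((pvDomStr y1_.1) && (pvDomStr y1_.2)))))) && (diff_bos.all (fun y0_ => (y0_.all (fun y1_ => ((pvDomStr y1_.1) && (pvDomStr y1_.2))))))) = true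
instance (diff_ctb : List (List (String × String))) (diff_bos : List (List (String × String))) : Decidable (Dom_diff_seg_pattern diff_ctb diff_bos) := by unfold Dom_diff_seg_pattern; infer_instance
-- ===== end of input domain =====

-- B replaces A's single interleaved pass (dedup + count per step) by three phases: group all
-- pairs by pattern, then counts = group sizes, then an order-preserving dedup of each group.
-- Objective: alternative decomposition; same asymptotic cost.

-- ===== PORT A =====
-- shared by both ports: the pattern key '{} = {}'.format(' + '.join(...), ' + '.join(...))
def pvPat (ctb : List (String × String)) (bos : List (String × String)) : String :=
  PySem.Str.join " = "
    [PySem.Str.join " + " (ctb.map (fun i => i.2)),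
     PySem.Str.join " + " (bos.map (fun i => i.2))]

-- one iteration of A's loop over zip(diff_ctb, diff_bos); state = (patterns_words, patterns_counts)
def pvStepA
    (st : PySem.Dict String (List (List String × List String)) × PySem.Dict String Int)
    (cb : List (String × String) × List (String × String)) :
    PySem.Dict String (List (List String × List String)) × PySem.Dict String Int :=
  let pat := pvPat cb.1 cb.2
  let w := (cb.1.map (fun i => i.1), cb.2.map (fun i => i.1))
  -- patterns_words.get(pat,'')=='' : a stored list never compares equal to '', so this is a key-presence test
  match st.1.get? pat with
  | none => (st.1.insert pat [w], st.2.insert pat 1)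
  | some lst =>
      ((if w ∈ lst then st.1 else st.1.insert pat (lst ++ [w])),
       -- int(patterns_counts[pat])+1 : the key is always present in this branch (same keys as patterns_words)
       st.2.insert pat (st.2.getD pat 0 + 1))

def diff_seg_pattern (diff_ctb : List (List (String × String))) (diff_bos : List (List (String × String))) : (List (String × List (List String × List String))) × (List (String × Int)) :=
  let st := (diff_ctb.zip diff_bos).foldl pvStepA (PySem.Dict.empty, PySem.Dict.empty)
  (st.1.items, st.2.items)

-- ===== PORT B =====
-- phase 1 loop body: groups.setdefault(pat, []).append(pair)
def pvStepB (g : PySem.Dict String (List (List String × List String)))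
    (cb : List (String × String) × List (String × String)) :
    PySem.Dict String (List (List String × List String)) :=
  g.modify (pvPat cb.1 cb.2) []
    (fun L => L ++ [(cb.1.map (fun i => i.1), cb.2.map (fun i => i.1))])

def pvGroupB (diff_ctb : List (List (String × String))) (diff_bos : List (List (String × String))) :
    PySem.Dict String (List (List String × List String)) :=
  (diff_ctb.zip diff_bos).foldl pvStepB PySem.Dict.empty

-- phase 3 inner loop: order-preserving dedup of one group's pairs
def pvUniq (pairs : List (List String × List String)) : List (List String × List String) :=
  pairs.foldl (fun acc p => if p ∈ acc then acc else acc ++ [p]) []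

def diff_seg_pattern_alt (diff_ctb : List (List (String × String))) (diff_bos : List (List (String × String))) : (List (String × List (List String × List String))) × (List (String × Int)) :=
  let groups := pvGroupB diff_ctb diff_bos
  (groups.items.map (fun kv => (kv.1, pvUniq kv.2)),
   groups.items.map (fun kv => (kv.1, (kv.2.length : Int))))

-- ===== PRECONDITION & SPEC =====
def Spec_diff_seg_pattern (diff_ctb : List (List (String × String))) (diff_bos : List (List (String × String))) (out : (List (String × List (List String × List String))) × (List (String × Int))) : Prop := out = diff_seg_pattern_alt diff_ctb diff_bos
instance (diff_ctb : List (List (String × String))) (diff_bos : List (List (String × String))) (out : (List (String × List (List String × List String))) × (List (String × Int))) : Decidable (Spec_diff_seg_pattern diff_ctb diff_bos out) := by unfold Spec_diff_seg_pattern; infer_instance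

-- ===== CLAIM (what is proved, stated in full; the proofs are below) =====
def Claim_equal_diff_seg_pattern : Prop := ∀ (diff_ctb : List (List (String × String))) (diff_bos : List (List (String × String))), Dom_diff_seg_pattern diff_ctb diff_bos → Spec_diff_seg_pattern diff_ctb diff_bos (diff_seg_pattern diff_ctb diff_bos)

-- ===== LEMMAS AND PROOFS =====

-- map a function over the values of a dict, keeping keys and order
def pvMapVal {β : Type} (f : List (List String × List String) → β)
    (g : PySem.Dict String (List (List String × List String))) : PySem.Dict String β :=
  PySem.Dict.mk (g.items.map (fun kv => (kv.1, f kv.2)))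

theorem pv_find?_mapVal {V β : Type} (f : V → β) (k : String) (l : List (String × V)) :
    List.find? (fun p => p.1 == k) (l.map (fun kv => (kv.1, f kv.2)))
      = (List.find? (fun p => p.1 == k) l).map (fun kv => (kv.1, f kv.2)) := by
  induction l with
  | nil => rfl
  | cons p t ih =>
      cases hb : (p.1 == k) with
      | true => simp [List.find?, hb]
      | false => simp [List.find?, hb, ih]

theorem pv_get?_mapVal {β : Type} (f : List (List String × List String) → β)
    (g : PySem.Dict String (List (List String × List String))) (k : String) :
    (pvMapVal f g).get? k = (g.get? k).map f := by
  obtain ⟨l⟩ := g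
  show Option.map (fun x => x.2)
        (List.find? (fun p => p.1 == k) (l.map (fun kv => (kv.1, f kv.2))))
      = Option.map f (Option.map (fun x => x.2) (List.find? (fun p => p.1 == k) l))
  rw [pv_find?_mapVal]
  cases List.find? (fun p => p.1 == k) l <;> rfl

theorem pv_contains_mapVal {β : Type} (f : List (List String × List String) → β)
    (g : PySem.Dict String (List (List String × List String))) (k : String) :
    (pvMapVal f g).contains k = g.contains k := by
  obtain ⟨l⟩ := g
  show (l.map (fun kv => (kv.1, f kv.2))).any (fun p => p.1 == k) = l.any (fun p => p.1 == k)
  induction l with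
  | nil => rfl
  | cons p t ih => simp [List.any_cons] at ih ⊢; rw [ih]

theorem pv_keys_mapVal {β : Type} (f : List (List String × List String) → β)
    (g : PySem.Dict String (List (List String × List String))) :
    (pvMapVal f g).keys = g.keys := by
  obtain ⟨l⟩ := g
  show (l.map (fun kv => (kv.1, f kv.2))).map (fun x => x.1) = l.map (fun x => x.1)
  simp [List.map_map]

theorem pv_insert_mapVal {β : Type} (f : List (List String × List String) → β)
    (g : PySem.Dict String (List (List String × List String))) (k : String)
    (v : List (List String × List String)) :
    (pvMapVal f g).insert k (f v) = pvMapVal f (g.insert k v) := by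
  by_cases h : g.contains k = true
  · simp only [PySem.Dict.insert, pv_contains_mapVal, h, if_true]
    simp only [pvMapVal, List.map_map]
    refine congrArg PySem.Dict.mk ?_
    apply List.map_congr_left
    intro p _
    by_cases hp : p.1 = k <;> simp [Function.comp, hp]
  · have h' : g.contains k = false := by simpa using h
    simp only [PySem.Dict.insert, pv_contains_mapVal, h', if_false, Bool.false_eq_true]
    simp [pvMapVal]

theorem pv_replace_of_find? {V : Type} (k : String) (v : V) (l : List (String × V))
    (hnd : (l.map (fun x => x.1)).Nodup)
    (h : List.find? (fun p => p.1 == k) l = some (k, v)) :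
    l.map (fun p => if p.1 == k then (k, v) else p) = l := by
  induction l with
  | nil => simp at h
  | cons p t ih =>
      cases hb : (p.1 == k) with
      | true =>
          have hk : p.1 = k := by simpa using hb
          have hv : p = (k, v) := by simpa [List.find?, hb] using h
          have hpn : p.1 ∉ t.map (fun x => x.1) := (List.nodup_cons.mp hnd).1
          have hknot : ∀ q ∈ t, (q.1 == k) = false := by
            intro q hq
            have hqk : q.1 ≠ k := by
              intro hqk
              exact hpn (by rw [hk, ← hqk]; exact List.mem_map_of_mem hq)
            simpa using hqk
          have ht : t.map (fun p => if p.1 == k then (k, v) else p) = t := by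
            conv_rhs => rw [← List.map_id t]
            apply List.map_congr_left
            intro q hq
            simp [hknot q hq]
          rw [List.map_cons, ht]
          simp [hb, ← hv]
      | false =>
          have h' : List.find? (fun p => p.1 == k) t = some (k, v) := by
            simpa [List.find?, hb] using h
          have ht := ih (List.nodup_cons.mp hnd).2 h'
          rw [List.map_cons, ht]
          simp [hb]

theorem pv_insert_self_of_get? (g : PySem.Dict String (List (List String × List String)))
    (k : String) (v : List (List String × List String))
    (hnd : g.keys.Nodup) (h : g.get? k = some v) : g.insert k v = g := by
  obtain ⟨l⟩ := g
  have hkeys : (l.map (fun x => x.1)).Nodup := hnd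
  have hfind : List.find? (fun p => p.1 == k) l = some (k, v) := by
    simp only [PySem.Dict.get?] at h
    cases hf : List.find? (fun p => p.1 == k) l with
    | none => simp [hf] at h
    | some pr =>
        obtain ⟨a, b⟩ := pr
        have hv : b = v := by simpa [hf] using h
        have hk : a = k := by simpa using List.find?_some hf
        subst hk; subst hv; rfl
  have hc : ({ items := l } : PySem.Dict String (List (List String × List String))).contains k = true := by
    show l.any (fun p => p.1 == k) = true
    exact List.any_eq_true.mpr ⟨(k, v), List.mem_of_find?_eq_some hfind, by simp⟩
  simp only [PySem.Dict.insert, hc, if_true]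
  exact congrArg PySem.Dict.mk (pv_replace_of_find? k v l hkeys hfind)

theorem pvUniq_append (L : List (List String × List String)) (w : List String × List String) :
    pvUniq (L ++ [w]) = if w ∈ pvUniq L then pvUniq L else pvUniq L ++ [w] := by
  simp [pvUniq, List.foldl_append]

-- the loop-step correspondence: A's step acting on the images of g equals the images of B's grouping step
theorem pv_step (g : PySem.Dict String (List (List String × List String)))
    (hnd : g.keys.Nodup) (cb : List (String × String) × List (String × String)) :
    pvStepA (pvMapVal pvUniq g, pvMapVal (fun L => (L.length : Int)) g) cb
      = (pvMapVal pvUniq (pvStepB g cb), pvMapVal (fun L => (L.length : Int)) (pvStepB g cb)) := by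
  cases h : g.get? (pvPat cb.1 cb.2) with
  | none =>
      have hB : pvStepB g cb = g.insert (pvPat cb.1 cb.2)
          [(cb.1.map (fun i => i.1), cb.2.map (fun i => i.1))] := by
        simp [pvStepB, PySem.Dict.modify, PySem.Dict.getD, h]
      simp only [pvStepA, pv_get?_mapVal, h, Option.map_none, hB, Prod.mk.injEq]
      constructor
      · conv_lhs => rw [show ([(cb.1.map (fun i => i.1), cb.2.map (fun i => i.1))] :
            List (List String × List String))
            = pvUniq [(cb.1.map (fun i => i.1), cb.2.map (fun i => i.1))] from by simp [pvUniq]]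
        exact pv_insert_mapVal pvUniq g _ _
      · conv_lhs => rw [show (1 : Int)
            = ((([(cb.1.map (fun i => i.1), cb.2.map (fun i => i.1))] :
               List (List String × List String)).length : Nat) : Int) from by simp]
        exact pv_insert_mapVal (fun L => (L.length : Int)) g _ _
  | some L =>
      have hB : pvStepB g cb = g.insert (pvPat cb.1 cb.2)
          (L ++ [(cb.1.map (fun i => i.1), cb.2.map (fun i => i.1))]) := by
        simp [pvStepB, PySem.Dict.modify, PySem.Dict.getD, h]
      simp only [pvStepA, pv_get?_mapVal, h, Option.map_some, hB, Prod.mk.injEq]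
      refine ⟨?_, ?_⟩
      · rw [← pv_insert_mapVal pvUniq g, pvUniq_append]
        by_cases hw : (cb.1.map (fun i => i.1), cb.2.map (fun i => i.1)) ∈ pvUniq L
        · simp only [hw, if_pos]
          exact (pv_insert_self_of_get? (pvMapVal pvUniq g) _ _
            (by rw [pv_keys_mapVal]; exact hnd)
            (by rw [pv_get?_mapVal, h]; rfl)).symm
        · simp [hw]
      · rw [← pv_insert_mapVal (fun L => (L.length : Int)) g]
        congr 1
        simp [PySem.Dict.getD, pv_get?_mapVal, h]

theorem pv_nodup_stepB (g : PySem.Dict String (List (List String × List String)))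
    (hnd : g.keys.Nodup) (cb : List (String × String) × List (String × String)) :
    (pvStepB g cb).keys.Nodup := by
  unfold pvStepB PySem.Dict.modify
  exact PySem.Dict.nodup_keys_insert _ _ _ hnd

theorem pv_main (xs : List (List (String × String) × List (String × String)))
    (g : PySem.Dict String (List (List String × List String))) (hnd : g.keys.Nodup) :
    xs.foldl pvStepA (pvMapVal pvUniq g, pvMapVal (fun L => (L.length : Int)) g)
      = (pvMapVal pvUniq (xs.foldl pvStepB g), pvMapVal (fun L => (L.length : Int)) (xs.foldl pvStepB g)) := by
  induction xs generalizing g with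
  | nil => rfl
  | cons x xs ih =>
      simp only [List.foldl_cons, pv_step g hnd x]
      exact ih (pvStepB g x) (pv_nodup_stepB g hnd x)

-- ===== VERDICT (by name: the statement is the Claim_ definition above) =====
theorem diff_seg_pattern_spec : Claim_equal_diff_seg_pattern := by
  unfold Claim_equal_diff_seg_pattern
  intro dc db _
  unfold Spec_diff_seg_pattern diff_seg_pattern diff_seg_pattern_alt pvGroupB
  have h := pv_main (dc.zip db) PySem.Dict.empty List.nodup_nil
  have hinit : ((PySem.Dict.empty, PySem.Dict.empty) :
      PySem.Dict String (List (List String × List String)) × PySem.Dict String Int)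
      = (pvMapVal pvUniq PySem.Dict.empty, pvMapVal (fun L => (L.length : Int)) PySem.Dict.empty) := rfl
  rw [hinit, h]
  rfl
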